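-- pv_equiv track=rewrite | github.com/Jousure/Data_generation | backend/app/api/schema.py | get_rule_based_schema
-- ===== SOURCE A (Python) =====
-- RULE_BASED_SCHEMAS = {
--     "customer": ["customer_id", "first_name", "last_name", "email", "phone", "address", "city", "country", "registration_date", "last_purchase_date", "total_spent"],
--     "product": ["product_id", "product_name", "category", "price", "stock_quantity", "supplier", "sku", "description", "weight", "brand"],
--     "employee": ["employee_id", "first_name", "last_name", "email", "department", "position", "salary", "hire_date", "manager_id", "status"],
--     "order": ["order_id", "customer_id", "order_date", "shipping_date", "delivery_date", "status", "total_amount", "payment_method"],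
--     "student": ["student_id", "first_name", "last_name", "email", "grade", "enrollment_date", "major", "gpa", "credits"],
--     "inventory": ["item_id", "item_name", "category", "quantity", "location", "last_updated", "supplier", "cost", "reorder_level"],
--     "sales": ["sale_id", "product_id", "customer_id", "sale_date", "quantity", "unit_price", "total_price", "salesperson"],
--     "hospital": ["patient_id", "first_name", "last_name", "dob", "admission_date", "discharge_date", "diagnosis", "doctor", "department"],
--     "financial": ["transaction_id", "account_id", "transaction_date", "amount", "type", "category", "description", "balance"],
--     "user": ["user_id", "username", "email", "first_name", "last_name", "created_at", "last_login", "status", "role"],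
--     "contact": ["contact_id", "first_name", "last_name", "email", "phone", "company", "position", "created_at"],
--     "transaction": ["transaction_id", "date", "amount", "type", "description", "category", "account_id"],
--     "booking": ["booking_id", "customer_id", "service", "date", "time", "status", "amount", "created_at"],
--     "review": ["review_id", "product_id", "customer_id", "rating", "comment", "date", "verified"],
--     "project": ["project_id", "name", "description", "start_date", "end_date", "status", "budget", "manager_id"],
--     "task": ["task_id", "project_id", "title", "description", "status", "priority", "due_date", "assignee_id"],
-- }
--
-- def get_rule_based_schema(topic):
--     """Enhanced rule-based schema generation with instant matching"""
--     topic = topic.lower()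
--
--     # Check for exact matches first
--     for key, schema in RULE_BASED_SCHEMAS.items():
--         if key in topic:
--             return schema
--
--     # Enhanced keyword matching with priority
--     if any(word in topic for word in ["customer", "client", "user", "account"]):
--         return RULE_BASED_SCHEMAS["customer"]
--     elif any(word in topic for word in ["product", "item", "inventory", "goods"]):
--         return RULE_BASED_SCHEMAS["product"]
--     elif any(word in topic for word in ["employee", "staff", "worker", "personnel"]):
--         return RULE_BASED_SCHEMAS["employee"]
--     elif any(word in topic for word in ["order", "sale", "purchase", "transaction"]):
--         return RULE_BASED_SCHEMAS["order"]
--     elif any(word in topic for word in ["student", "education", "school", "university"]):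
--         return RULE_BASED_SCHEMAS["student"]
--     elif any(word in topic for word in ["hospital", "patient", "medical", "health"]):
--         return RULE_BASED_SCHEMAS["hospital"]
--     elif any(word in topic for word in ["financial", "money", "payment", "billing"]):
--         return RULE_BASED_SCHEMAS["financial"]
--     elif any(word in topic for word in ["contact", "lead", "prospect"]):
--         return RULE_BASED_SCHEMAS["contact"]
--     elif any(word in topic for word in ["booking", "reservation", "appointment"]):
--         return RULE_BASED_SCHEMAS["booking"]
--     elif any(word in topic for word in ["review", "rating", "feedback"]):
--         return RULE_BASED_SCHEMAS["review"]
--     elif any(word in topic for word in ["project", "task", "work"]):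
--         return RULE_BASED_SCHEMAS["project"]
--
--     # Generic fallback schemas based on common patterns
--     if any(word in topic for word in ["data", "record", "information"]):
--         return ["id", "name", "type", "value", "description", "status", "created_at", "updated_at"]
--     elif any(word in topic for word in ["list", "directory", "catalog"]):
--         return ["id", "name", "category", "description", "url", "status", "created_at"]
--     elif any(word in topic for word in ["log", "event", "activity"]):
--         return ["id", "event_type", "description", "timestamp", "user_id", "ip_address", "details"]
--
--     # Default fallback
--     return ["id", "name", "description", "value", "created_at"]
-- ===== SOURCE B (Python) =====
-- RULE_BASED_SCHEMAS = {
--     "customer": ["customer_id", "first_name", "last_name", "email", "phone", "address", "city", "country", "registration_date", "last_purchase_date", "total_spent"],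
--     "product": ["product_id", "product_name", "category", "price", "stock_quantity", "supplier", "sku", "description", "weight", "brand"],
--     "employee": ["employee_id", "first_name", "last_name", "email", "department", "position", "salary", "hire_date", "manager_id", "status"],
--     "order": ["order_id", "customer_id", "order_date", "shipping_date", "delivery_date", "status", "total_amount", "payment_method"],
--     "student": ["student_id", "first_name", "last_name", "email", "grade", "enrollment_date", "major", "gpa", "credits"],
--     "inventory": ["item_id", "item_name", "category", "quantity", "location", "last_updated", "supplier", "cost", "reorder_level"],
--     "sales": ["sale_id", "product_id", "customer_id", "sale_date", "quantity", "unit_price", "total_price", "salesperson"],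
--     "hospital": ["patient_id", "first_name", "last_name", "dob", "admission_date", "discharge_date", "diagnosis", "doctor", "department"],
--     "financial": ["transaction_id", "account_id", "transaction_date", "amount", "type", "category", "description", "balance"],
--     "user": ["user_id", "username", "email", "first_name", "last_name", "created_at", "last_login", "status", "role"],
--     "contact": ["contact_id", "first_name", "last_name", "email", "phone", "company", "position", "created_at"],
--     "transaction": ["transaction_id", "date", "amount", "type", "description", "category", "account_id"],
--     "booking": ["booking_id", "customer_id", "service", "date", "time", "status", "amount", "created_at"],
--     "review": ["review_id", "product_id", "customer_id", "rating", "comment", "date", "verified"],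
--     "project": ["project_id", "name", "description", "start_date", "end_date", "status", "budget", "manager_id"],
--     "task": ["task_id", "project_id", "title", "description", "status", "priority", "due_date", "assignee_id"],
-- }
--
-- _KEYWORD_GROUPS = [
--     (["customer", "client", "user", "account"], RULE_BASED_SCHEMAS["customer"]),
--     (["product", "item", "inventory", "goods"], RULE_BASED_SCHEMAS["product"]),
--     (["employee", "staff", "worker", "personnel"], RULE_BASED_SCHEMAS["employee"]),
--     (["order", "sale", "purchase", "transaction"], RULE_BASED_SCHEMAS["order"]),
--     (["student", "education", "school", "university"], RULE_BASED_SCHEMAS["student"]),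
--     (["hospital", "patient", "medical", "health"], RULE_BASED_SCHEMAS["hospital"]),
--     (["financial", "money", "payment", "billing"], RULE_BASED_SCHEMAS["financial"]),
--     (["contact", "lead", "prospect"], RULE_BASED_SCHEMAS["contact"]),
--     (["booking", "reservation", "appointment"], RULE_BASED_SCHEMAS["booking"]),
--     (["review", "rating", "feedback"], RULE_BASED_SCHEMAS["review"]),
--     (["project", "task", "work"], RULE_BASED_SCHEMAS["project"]),
--     (["data", "record", "information"], ["id", "name", "type", "value", "description", "status", "created_at", "updated_at"]),
--     (["list", "directory", "catalog"], ["id", "name", "category", "description", "url", "status", "created_at"]),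
--     (["log", "event", "activity"], ["id", "event_type", "description", "timestamp", "user_id", "ip_address", "details"]),
-- ]
--
-- # Priority index built once: each trigger word -> (rank, schema); the rank records
-- # the rule's position (exact keys first, then keyword groups), and when a word
-- # occurs in several rules the earliest (lowest) rank is kept.
-- _WORD_SCHEMA = {}
-- for _rank, (_word, _schema) in enumerate(
--         [(k, v) for k, v in RULE_BASED_SCHEMAS.items()]
--         + [(w, s) for ws, s in _KEYWORD_GROUPS for w in ws]):
--     if _word not in _WORD_SCHEMA:
--         _WORD_SCHEMA[_word] = (_rank, _schema)
--
-- _DEFAULT = ["id", "name", "description", "value", "created_at"]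
--
--
-- def get_rule_based_schema(topic):
--     """Priority-indexed lookup: scan every trigger word once, keep the lowest-ranked hit."""
--     topic = topic.lower()
--     best = None
--     for word, (rank, schema) in _WORD_SCHEMA.items():
--         if word in topic and (best is None or rank < best[0]):
--             best = (rank, schema)
--     return best[1] if best is not None else _DEFAULT
-- ===== Notes on version B (the rewrite author's own statement) =====
-- stated objective: alternative
-- what changed: Replaced A's ordered early-return cascade (a scan over the dict, then a long if/elif keyword chain and fallback ifs) by a word->(rank,schema) priority index built once at module level and an exhaustive argmin scan that keeps the lowest-ranked matching trigger word.
import Mathlib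
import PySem

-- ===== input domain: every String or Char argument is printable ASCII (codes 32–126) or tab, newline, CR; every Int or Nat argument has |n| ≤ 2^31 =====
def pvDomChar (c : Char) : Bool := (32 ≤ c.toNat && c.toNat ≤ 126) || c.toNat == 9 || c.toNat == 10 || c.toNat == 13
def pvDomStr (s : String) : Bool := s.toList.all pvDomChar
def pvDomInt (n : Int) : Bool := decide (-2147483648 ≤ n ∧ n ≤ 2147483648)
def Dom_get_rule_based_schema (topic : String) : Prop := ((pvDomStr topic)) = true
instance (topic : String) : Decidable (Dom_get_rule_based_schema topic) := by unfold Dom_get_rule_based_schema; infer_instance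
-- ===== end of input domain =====

-- B replaces A's ordered early-return cascade (dict scan, then if/elif keyword chain) by a
-- priority index built once (trigger word -> (rank, schema)) scanned exhaustively, keeping
-- the lowest-ranked hit (objective: alternative; same cost).

-- ===== PORT A =====
-- the module-level dict, as an insertion-ordered association list
def RULE_BASED_SCHEMAS : List (String × List String) := [
  ("customer", ["customer_id", "first_name", "last_name", "email", "phone", "address", "city", "country", "registration_date", "last_purchase_date", "total_spent"]),
  ("product", ["product_id", "product_name", "category", "price", "stock_quantity", "supplier", "sku", "description", "weight", "brand"]),
  ("employee", ["employee_id", "first_name", "last_name", "email", "department", "position", "salary", "hire_date", "manager_id", "status"]),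
  ("order", ["order_id", "customer_id", "order_date", "shipping_date", "delivery_date", "status", "total_amount", "payment_method"]),
  ("student", ["student_id", "first_name", "last_name", "email", "grade", "enrollment_date", "major", "gpa", "credits"]),
  ("inventory", ["item_id", "item_name", "category", "quantity", "location", "last_updated", "supplier", "cost", "reorder_level"]),
  ("sales", ["sale_id", "product_id", "customer_id", "sale_date", "quantity", "unit_price", "total_price", "salesperson"]),
  ("hospital", ["patient_id", "first_name", "last_name", "dob", "admission_date", "discharge_date", "diagnosis", "doctor", "department"]),
  ("financial", ["transaction_id", "account_id", "transaction_date", "amount", "type", "category", "description", "balance"]),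
  ("user", ["user_id", "username", "email", "first_name", "last_name", "created_at", "last_login", "status", "role"]),
  ("contact", ["contact_id", "first_name", "last_name", "email", "phone", "company", "position", "created_at"]),
  ("transaction", ["transaction_id", "date", "amount", "type", "description", "category", "account_id"]),
  ("booking", ["booking_id", "customer_id", "service", "date", "time", "status", "amount", "created_at"]),
  ("review", ["review_id", "product_id", "customer_id", "rating", "comment", "date", "verified"]),
  ("project", ["project_id", "name", "description", "start_date", "end_date", "status", "budget", "manager_id"]),
  ("task", ["task_id", "project_id", "title", "description", "status", "priority", "due_date", "assignee_id"])]

-- dict lookup RULE_BASED_SCHEMAS[k] (all keys used are present, so getD with an unreachable default)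
def pvDictGet (k : String) : List String :=
  (PySem.Dict.mk RULE_BASED_SCHEMAS).getD k []

-- A's first loop: 'for key, schema in items: if key in topic: return schema' falling through
-- to the rest of the function (early return = first matching branch wins)
def get_rule_based_schema (topic : String) : List String :=
  let topic := PySem.Str.lower topic
  RULE_BASED_SCHEMAS.foldr (fun kv acc => if PySem.Str.isIn kv.1 topic then kv.2 else acc)
    (-- keyword matching if/elif chain
     if ["customer", "client", "user", "account"].any (fun w => PySem.Str.isIn w topic) then pvDictGet "customer"
     else if ["product", "item", "inventory", "goods"].any (fun w => PySem.Str.isIn w topic) then pvDictGet "product"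
     else if ["employee", "staff", "worker", "personnel"].any (fun w => PySem.Str.isIn w topic) then pvDictGet "employee"
     else if ["order", "sale", "purchase", "transaction"].any (fun w => PySem.Str.isIn w topic) then pvDictGet "order"
     else if ["student", "education", "school", "university"].any (fun w => PySem.Str.isIn w topic) then pvDictGet "student"
     else if ["hospital", "patient", "medical", "health"].any (fun w => PySem.Str.isIn w topic) then pvDictGet "hospital"
     else if ["financial", "money", "payment", "billing"].any (fun w => PySem.Str.isIn w topic) then pvDictGet "financial"
     else if ["contact", "lead", "prospect"].any (fun w => PySem.Str.isIn w topic) then pvDictGet "contact"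
     else if ["booking", "reservation", "appointment"].any (fun w => PySem.Str.isIn w topic) then pvDictGet "booking"
     else if ["review", "rating", "feedback"].any (fun w => PySem.Str.isIn w topic) then pvDictGet "review"
     else if ["project", "task", "work"].any (fun w => PySem.Str.isIn w topic) then pvDictGet "project"
     -- generic fallback schemas
     else if ["data", "record", "information"].any (fun w => PySem.Str.isIn w topic) then
       ["id", "name", "type", "value", "description", "status", "created_at", "updated_at"]
     else if ["list", "directory", "catalog"].any (fun w => PySem.Str.isIn w topic) then
       ["id", "name", "category", "description", "url", "status", "created_at"]
     else if ["log", "event", "activity"].any (fun w => PySem.Str.isIn w topic) then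
       ["id", "event_type", "description", "timestamp", "user_id", "ip_address", "details"]
     -- default fallback
     else ["id", "name", "description", "value", "created_at"])

-- ===== PORT B =====
-- Source B's _KEYWORD_GROUPS (the if/elif keyword groups plus the three generic fallback groups)
def pvKeywordGroups : List (List String × List String) := [
  (["customer", "client", "user", "account"], pvDictGet "customer"),
  (["product", "item", "inventory", "goods"], pvDictGet "product"),
  (["employee", "staff", "worker", "personnel"], pvDictGet "employee"),
  (["order", "sale", "purchase", "transaction"], pvDictGet "order"),
  (["student", "education", "school", "university"], pvDictGet "student"),
  (["hospital", "patient", "medical", "health"], pvDictGet "hospital"),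
  (["financial", "money", "payment", "billing"], pvDictGet "financial"),
  (["contact", "lead", "prospect"], pvDictGet "contact"),
  (["booking", "reservation", "appointment"], pvDictGet "booking"),
  (["review", "rating", "feedback"], pvDictGet "review"),
  (["project", "task", "work"], pvDictGet "project"),
  (["data", "record", "information"], ["id", "name", "type", "value", "description", "status", "created_at", "updated_at"]),
  (["list", "directory", "catalog"], ["id", "name", "category", "description", "url", "status", "created_at"]),
  (["log", "event", "activity"], ["id", "event_type", "description", "timestamp", "user_id", "ip_address", "details"])]

-- Source B's module-level loop building _WORD_SCHEMA: word -> (rank, schema), first occurrence wins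
def pvWordSchema : PySem.Dict String (Int × List String) :=
  (PySem.List.enumerate
      (RULE_BASED_SCHEMAS ++ pvKeywordGroups.flatMap (fun g => g.1.map (fun w => (w, g.2)))) 0).foldl
    (fun d p => if d.contains p.2.1 then d else d.insert p.2.1 (p.1, p.2.2))
    PySem.Dict.empty

def pvDefault : List String := ["id", "name", "description", "value", "created_at"]

-- Source B's for-loop: best := lowest-ranked (rank, schema) among matching trigger words
def pvBestLoop (t : String) :
    List (String × Int × List String) → Option (Int × List String) → Option (Int × List String)
  | [], best => best
  | ws :: rest, best =>
      pvBestLoop t rest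
        (if PySem.Str.isIn ws.1 t &&
            (match best with | none => true | some b => decide (ws.2.1 < b.1))
         then some ws.2 else best)

def get_rule_based_schema_alt (topic : String) : List String :=
  match pvBestLoop (PySem.Str.lower topic) pvWordSchema.items none with
  | some b => b.2
  | none => pvDefault

-- ===== PRECONDITION & SPEC =====
def Spec_get_rule_based_schema (topic : String) (out : List String) : Prop := out = get_rule_based_schema_alt topic
instance (topic : String) (out : List String) : Decidable (Spec_get_rule_based_schema topic out) := by unfold Spec_get_rule_based_schema; infer_instance

-- ===== CLAIM (what is proved, stated in full; the proofs are below) =====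
def Claim_equal_get_rule_based_schema : Prop := ∀ (topic : String), Dom_get_rule_based_schema topic → Spec_get_rule_based_schema topic (get_rule_based_schema topic)

-- ===== LEMMAS AND PROOFS =====

-- the proof helpers are parametrized by an abstract match predicate m (instantiated with
-- fun w => PySem.Str.isIn w (lower topic))

-- first group whose pattern list has a member matching m (A's cascade, as a table scan)
def pvGroupFM (m : String → Bool) : List (List String × List String) → List String
  | [] => pvDefault
  | (patterns, schema) :: rest =>
      if patterns.any m then schema
      else pvGroupFM m rest

-- first matching (word, schema) entry
def pvFMw (m : String → Bool) : List (String × List String) → Option (List String)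
  | [] => none
  | e :: r => if m e.1 then some e.2 else pvFMw m r

-- first matching ranked entry
def pvFM (m : String → Bool) : List (String × Int × List String) → Option (Int × List String)
  | [] => none
  | e :: r => if m e.1 then some e.2 else pvFM m r

-- keep-first dedup by word, threading the set of already-seen words
def pvDedup (seen : List String) : List (String × Int × List String) → List (String × Int × List String)
  | [] => []
  | e :: r => if e.1 ∈ seen then pvDedup seen r else e :: pvDedup (e.1 :: seen) r

-- the group table A's two phases scan, and its word-level flattening with ranks
def pvGroups : List (List String × List String) :=
  RULE_BASED_SCHEMAS.map (fun kv => ([kv.1], kv.2)) ++ pvKeywordGroups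

def pvFlat : List (String × List String) :=
  pvGroups.flatMap (fun g => g.1.map (fun w => (w, g.2)))

def pvRanked : List (String × Int × List String) :=
  (PySem.List.enumerate pvFlat 0).map (fun p => (p.2.1, p.1, p.2.2))

-- A = group-table scan
theorem pv_map_step (t : String) (l : List (String × List String))
    (rest : List (List String × List String)) :
    pvGroupFM (fun w => PySem.Str.isIn w t) (l.map (fun kv => ([kv.1], kv.2)) ++ rest) =
      l.foldr (fun kv acc => if PySem.Str.isIn kv.1 t then kv.2 else acc)
        (pvGroupFM (fun w => PySem.Str.isIn w t) rest) := by
  induction l with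
  | nil => simp [List.foldr]
  | cons kv l ih =>
      simp only [List.map, List.cons_append, pvGroupFM, List.any_cons,
        List.any_nil, Bool.or_false, ih, List.foldr_cons]

theorem pvA_eq_groupFM (topic : String) :
    get_rule_based_schema topic =
      pvGroupFM (fun w => PySem.Str.isIn w (PySem.Str.lower topic)) pvGroups := by
  unfold get_rule_based_schema pvGroups
  rw [pv_map_step]
  congr 1

-- flattening a group table preserves the first-match scan
theorem pvFMw_group (m : String → Bool) (ws : List String) (s : List String)
    (r : List (String × List String)) :
    pvFMw m (ws.map (fun w => (w, s)) ++ r) =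
      if ws.any m then some s else pvFMw m r := by
  induction ws with
  | nil => simp only [List.map_nil, List.nil_append, List.any_nil, Bool.false_eq_true, if_false]
  | cons w ws ih =>
      simp only [List.map, List.cons_append, pvFMw, List.any_cons, ih]
      by_cases h : m w = true
      · simp only [h, if_true, Bool.true_or]
      · simp only [Bool.not_eq_true] at h
        simp only [h, Bool.false_eq_true, if_false, Bool.false_or]

theorem pvGroupFM_eq_flat (m : String → Bool) (G : List (List String × List String)) :
    pvGroupFM m G = (pvFMw m (G.flatMap (fun g => g.1.map (fun w => (w, g.2))))).getD pvDefault := by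
  induction G with
  | nil => simp [pvGroupFM, pvFMw]
  | cons g G ih =>
      obtain ⟨ws, s⟩ := g
      simp only [List.flatMap_cons, pvGroupFM, pvFMw_group]
      by_cases h : ws.any m = true
      · simp only [h, if_true, Option.getD_some]
      · simp only [Bool.not_eq_true] at h
        simp only [h, Bool.false_eq_true, if_false, ih]

-- ranks are irrelevant to the first-match scan
theorem pvFM_drop (m : String → Bool) (l : List (String × Int × List String)) :
    (pvFM m l).map (·.2) = pvFMw m (l.map (fun e => (e.1, e.2.2))) := by
  induction l with
  | nil => rfl
  | cons e l ih =>
      simp only [pvFM, pvFMw, List.map]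
      by_cases h : m e.1 = true
      · simp only [h, if_true, Option.map_some]
      · simp only [Bool.not_eq_true] at h
        simp only [h, Bool.false_eq_true, if_false, ih]

-- removing later duplicates of already-seen non-matching words preserves the scan
theorem pvFM_dedup (m : String → Bool) (l : List (String × Int × List String)) :
    ∀ seen : List String, (∀ w ∈ seen, m w = false) →
      pvFM m (pvDedup seen l) = pvFM m l := by
  induction l with
  | nil => intro seen _; rfl
  | cons e l ih =>
      intro seen hseen
      simp only [pvDedup]
      by_cases hmem : e.1 ∈ seen
      · have hfalse := hseen e.1 hmem
        simp only [hmem, if_true, pvFM, hfalse, Bool.false_eq_true, if_false]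
        exact ih seen hseen
      · simp only [hmem, if_false, pvFM]
        by_cases h : m e.1 = true
        · simp only [h, if_true]
        · simp only [Bool.not_eq_true] at h
          simp only [h, Bool.false_eq_true, if_false]
          exact ih (e.1 :: seen) (by
            intro w hw
            rcases List.mem_cons.mp hw with rfl | hw'
            · exact h
            · exact hseen w hw')

-- the argmin fold keeps an established best when all remaining ranks are larger
theorem pvBestLoop_keep (t : String) (l : List (String × Int × List String))
    (b : Int × List String) (hall : ∀ e ∈ l, b.1 < e.2.1) :
    pvBestLoop t l (some b) = some b := by
  induction l with
  | nil => rfl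
  | cons e l ih =>
      have hnot : ¬ e.2.1 < b.1 := not_lt.mpr (le_of_lt (hall e (List.mem_cons_self)))
      simp only [pvBestLoop, hnot, decide_false, Bool.and_false]
      exact ih (fun e' he' => hall e' (List.mem_cons_of_mem _ he'))

-- on a strictly rank-ascending list, the argmin fold is the first-match scan
theorem pvBestLoop_eq_pvFM (t : String) (l : List (String × Int × List String))
    (hasc : l.Pairwise (fun a b => a.2.1 < b.2.1)) :
    pvBestLoop t l none = pvFM (fun w => PySem.Str.isIn w t) l := by
  induction l with
  | nil => rfl
  | cons e l ih =>
      rcases List.pairwise_cons.mp hasc with ⟨hhead, htail⟩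
      by_cases h : PySem.Str.isIn e.1 t = true
      · simp only [pvBestLoop, pvFM, h, Bool.true_and, if_true]
        exact pvBestLoop_keep t l e.2 (fun e' he' => hhead e' he')
      · simp only [Bool.not_eq_true] at h
        simp only [pvBestLoop, pvFM, h, Bool.false_and, Bool.false_eq_true, if_false]
        exact ih htail

-- the concrete closed-term facts about B's module-level index
set_option maxRecDepth 40000 in
theorem pvItems_eq : pvWordSchema.items = pvDedup [] pvRanked := by decide

set_option maxRecDepth 40000 in
theorem pvDedup_asc : (pvDedup [] pvRanked).Pairwise (fun a b => a.2.1 < b.2.1) := by decide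

set_option maxRecDepth 40000 in
theorem pvRanked_drop : pvRanked.map (fun e => (e.1, e.2.2)) = pvFlat := by decide

-- ===== VERDICT (by name: the statement is the Claim_ definition above) =====
theorem get_rule_based_schema_spec : Claim_equal_get_rule_based_schema := by
  intro topic _
  show get_rule_based_schema topic = get_rule_based_schema_alt topic
  set m : String → Bool := fun w => PySem.Str.isIn w (PySem.Str.lower topic) with hmdef
  have hA : get_rule_based_schema topic = (pvFMw m pvFlat).getD pvDefault := by
    rw [pvA_eq_groupFM, pvGroupFM_eq_flat]; rfl
  have hdedup : pvFM m (pvDedup [] pvRanked) = pvFM m pvRanked :=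
    pvFM_dedup m pvRanked [] (by intro w hw; cases hw)
  have hB : get_rule_based_schema_alt topic =
      ((pvFM m (pvDedup [] pvRanked)).map (·.2)).getD pvDefault := by
    unfold get_rule_based_schema_alt
    rw [pvItems_eq, pvBestLoop_eq_pvFM _ _ pvDedup_asc, ← hmdef]
    cases pvFM m (pvDedup [] pvRanked) <;> rfl
  rw [hA, hB, hdedup, pvFM_drop, pvRanked_drop]
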